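-- pv_equiv track=rewrite | github.com/Victor-Rodriguez-VR/Coding-challenges | minCharForPalindrome.py | minimumCharacters
-- ===== SOURCE A (Python) =====
-- def minimumCharacters(s):
--   count =0
--   i = 0
--   j = len(s) - 1
--   while j > i:
--     if not s[i].isalnum():
--       i += 1
--     elif not s[j].isalnum():
--       j -= 1
--     elif s[i].lower() == s[j].lower():
--       i += 1
--       j -= 1
--     else:
--       count+=1
--       j-=1
--   return count
-- ===== SOURCE B (Python) =====
-- def minimumCharacters(s):
--     # One pass keeps only alphanumerics, lowercased.
--     u = [c.lower() for c in s if c.isalnum()]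
--     count = 0
--     # Whittle the list itself down from both ends: no index arithmetic.
--     while len(u) > 1:
--         last = u.pop()
--         if u[0] == last:
--             del u[0]
--         else:
--             count += 1
--     return count
-- ===== Notes on version B (the rewrite author's own statement) =====
-- stated objective: simpler
-- what changed: B first filters/lowercases the alphanumerics in one pass and then shrinks the remaining list itself from both ends (pop the last element; drop the front on a match, count otherwise), replacing A's single loop over a pair of raw-string indices with four interleaved branches by a two-branch loop whose state is the remaining sublist.
import Mathlib
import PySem

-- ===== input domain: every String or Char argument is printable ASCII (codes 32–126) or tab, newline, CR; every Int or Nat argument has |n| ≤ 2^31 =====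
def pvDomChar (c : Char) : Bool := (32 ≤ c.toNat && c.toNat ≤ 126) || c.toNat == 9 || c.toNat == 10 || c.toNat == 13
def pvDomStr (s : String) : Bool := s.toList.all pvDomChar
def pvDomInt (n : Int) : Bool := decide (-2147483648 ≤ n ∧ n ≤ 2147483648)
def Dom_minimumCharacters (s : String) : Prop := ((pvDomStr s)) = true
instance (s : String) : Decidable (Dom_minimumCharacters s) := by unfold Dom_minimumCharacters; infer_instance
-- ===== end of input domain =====

-- B filters/lowercases the alphanumerics once and then whittles the remaining list itself
-- down from both ends (no indices); simpler loop, same value.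

-- ===== PORT A =====
-- A's while loop; i, j always stay in range while j > i (i starts at 0 and only grows,
-- j starts at len-1 and only shrinks), so the `.getD ' '` default of the exact s[i]
-- lookup (pyGet?) is never used.
def pvLoopA (cs : List Char) (i j count : Int) : Int :=
  if h : j > i then
    let ci := (PySem.List.pyGet? cs i).getD ' '
    let cj := (PySem.List.pyGet? cs j).getD ' '
    if ¬ PySem.Chars.isalnum ci then pvLoopA cs (i + 1) j count
    else if ¬ PySem.Chars.isalnum cj then pvLoopA cs i (j - 1) count
    else if PySem.Chars.lowerChar ci = PySem.Chars.lowerChar cj then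
      pvLoopA cs (i + 1) (j - 1) count
    else pvLoopA cs i (j - 1) (count + 1)
  else count
termination_by (j - i).toNat
decreasing_by all_goals omega

def minimumCharacters (s : String) : Int :=
  pvLoopA s.toList 0 ((s.toList.length : Int) - 1) 0

-- ===== PORT B =====
-- B's while loop: `u.pop()` = take the last element and keep `u.dropLast`; on a match
-- `del u[0]` = keep the tail. While 1 < len u both ends exist, so the `.getD ' '`
-- defaults of the exact head?/getLast? lookups are never used.
def pvLoopB (u : List Char) (count : Int) : Int :=
  if h : 1 < u.length then
    let last := u.getLast?.getD ' '
    let u' := u.dropLast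
    if u'.head?.getD ' ' = last then pvLoopB u'.tail count
    else pvLoopB u' (count + 1)
  else count
termination_by u.length
decreasing_by
  · simp [List.length_tail]; omega
  · simp; omega

def minimumCharacters_alt (s : String) : Int :=
  pvLoopB ((s.toList.filter PySem.Chars.isalnum).map PySem.Chars.lowerChar) 0

-- ===== PRECONDITION & SPEC =====
def Spec_minimumCharacters (s : String) (out : Int) : Prop := out = minimumCharacters_alt s
instance (s : String) (out : Int) : Decidable (Spec_minimumCharacters s out) := by unfold Spec_minimumCharacters; infer_instance

-- ===== CLAIM (what is proved, stated in full; the proofs are below) =====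
def Claim_equal_minimumCharacters : Prop := ∀ (s : String), Dom_minimumCharacters s → Spec_minimumCharacters s (minimumCharacters s)

-- ===== LEMMAS AND PROOFS =====

-- proof-side intermediate: both ports reduce to this shrink-the-list recursion
def pvShrink (t : List Char) (count : Int) : Int :=
  if h : 1 < t.length then
    if t.head? = t.getLast? then pvShrink t.tail.dropLast count
    else pvShrink t.dropLast (count + 1)
  else count
termination_by t.length
decreasing_by
  · simp [List.length_tail]; omega
  · simp; omega

def pvF (l : List Char) : List Char := (l.filter PySem.Chars.isalnum).map PySem.Chars.lowerChar

theorem pvShrink_short (t : List Char) (c : Int) (h : ¬ 1 < t.length) : pvShrink t c = c := by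
  rw [pvShrink]; simp [h]

theorem pvLoopB_eq_shrink : ∀ (n : Nat) (u : List Char) (c : Int), u.length ≤ n →
    pvLoopB u c = pvShrink u c := by
  intro n
  induction n with
  | zero =>
    intro u c hn
    rw [pvLoopB, pvShrink]
    simp_all
  | succ n ih =>
    intro u c hn
    by_cases h : 1 < u.length
    · match u, h with
      | a :: v, h =>
        have hv : v ≠ [] := by
          intro hne; rw [hne] at h; simp at h
        have hdl : (a :: v).dropLast = a :: v.dropLast := by
          simp [List.dropLast_cons_of_ne_nil hv]
        have hlast : (a :: v).getLast? = some ((a :: v).getLast (by simp)) :=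
          List.getLast?_eq_some_getLast (by simp)
        rw [pvLoopB, dif_pos h, pvShrink, dif_pos h]
        simp only [hdl, List.head?_cons, List.tail_cons, hlast]
        by_cases heq : a = (a :: v).getLast (by simp)
        · rw [if_pos (by simpa using heq), if_pos (by simpa using heq)]
          exact ih _ _ (by simp at hn ⊢; omega)
        · rw [if_neg (by simpa using heq), if_neg (by simpa using heq)]
          rw [← hdl]
          exact ih _ _ (by simp at hn ⊢; omega)
    · rw [pvLoopB, dif_neg h, pvShrink_short _ _ h]

theorem pvF_cons (a : Char) (l : List Char) :
    pvF (a :: l) = if PySem.Chars.isalnum a then PySem.Chars.lowerChar a :: pvF l else pvF l := by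
  by_cases h : PySem.Chars.isalnum a <;> simp [pvF, h]

theorem pvF_append (l l' : List Char) : pvF (l ++ l') = pvF l ++ pvF l' := by
  simp [pvF]

theorem pvF_short (l : List Char) (c : Int) (h : l.length ≤ 1) : pvShrink (pvF l) c = c := by
  apply pvShrink_short
  have := List.length_filter_le PySem.Chars.isalnum l
  simp [pvF]; omega

theorem pvShrink_cons_concat (a b : Char) (l : List Char) (c : Int) :
    pvShrink (a :: (l ++ [b])) c
      = if a = b then pvShrink l c else pvShrink (a :: l) (c + 1) := by
  have hgl : (a :: (l ++ [b])).getLast? = some b := by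
    rw [show a :: (l ++ [b]) = (a :: l) ++ [b] by simp]
    exact List.getLast?_concat
  rw [pvShrink, dif_pos (by simp)]
  by_cases hab : a = b
  · rw [if_pos (by rw [hgl]; simp [hab]), if_pos hab]
    congr 1
    simp
  · rw [if_neg (by rw [hgl]; simp [hab]), if_neg hab]
    congr 1
    rw [show a :: (l ++ [b]) = (a :: l) ++ [b] by simp, List.dropLast_concat]

theorem pvKey (cs : List Char) : ∀ (n : Nat) (i j c : Int), (j - i).toNat ≤ n → 0 ≤ i →
    j < (cs.length : Int) →
    pvLoopA cs i j c = pvShrink (pvF ((cs.drop i.toNat).take (j + 1 - i).toNat)) c := by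
  intro n
  induction n with
  | zero =>
    intro i j c hn hi hj
    rw [pvLoopA, dif_neg (by omega), pvF_short]
    have := List.length_take_le (j + 1 - i).toNat (cs.drop i.toNat)
    omega
  | succ n ih =>
    intro i j c hn hi hj
    by_cases hji : j > i
    · have hij : i.toNat < j.toNat := by omega
      have hjlen : j.toNat < cs.length := by omega
      have hilen : i.toNat < cs.length := by omega
      set ci := cs[i.toNat] with hci
      set cj := cs[j.toNat] with hcj
      have hgi : (PySem.List.pyGet? cs i).getD ' ' = ci := by
        rw [show i = ((i.toNat : Nat) : Int) by omega, PySem.List.pyGet?_natCast,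
          List.getElem?_eq_getElem hilen]; rfl
      have hgj : (PySem.List.pyGet? cs j).getD ' ' = cj := by
        rw [show j = ((j.toNat : Nat) : Int) by omega, PySem.List.pyGet?_natCast,
          List.getElem?_eq_getElem hjlen]; rfl
      set m := (j + 1 - i).toNat with hm
      have hm2 : 2 ≤ m := by omega
      have hmidlast : (cs.drop (i.toNat + 1)).take (m - 1)
          = (cs.drop (i.toNat + 1)).take (m - 2) ++ [cj] := by
        rw [show m - 1 = (m - 2) + 1 by omega, List.take_add_one]
        have h2 : (cs.drop (i.toNat + 1))[m - 2]? = some cj := by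
          have hidx : i.toNat + 1 + (m - 2) = j.toNat := by omega
          rw [List.getElem?_drop, hidx, List.getElem?_eq_getElem hjlen]
        rw [h2]; rfl
      have hsegl : (cs.drop i.toNat).take (m - 1)
          = ci :: (cs.drop (i.toNat + 1)).take (m - 2) := by
        rw [List.drop_eq_getElem_cons hilen, ← List.take_succ_cons]
        congr 1; omega
      have hseg : (cs.drop i.toNat).take m
          = ci :: ((cs.drop (i.toNat + 1)).take (m - 2) ++ [cj]) := by
        calc (cs.drop i.toNat).take m
            = ci :: (cs.drop (i.toNat + 1)).take (m - 1) := by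
              rw [List.drop_eq_getElem_cons hilen, ← List.take_succ_cons]
              congr 1; omega
          _ = _ := by rw [hmidlast]
      rw [pvLoopA, dif_pos hji]
      simp only [hgi, hgj]
      by_cases hai : PySem.Chars.isalnum ci
      · by_cases haj : PySem.Chars.isalnum cj
        · -- both ends alphanumeric: compare lowercased
          rw [if_neg (by simpa using hai), if_neg (by simpa using haj)]
          have hFcj : pvF [cj] = [PySem.Chars.lowerChar cj] := by simp [pvF, haj]
          rw [hseg, pvF_cons, if_pos hai, pvF_append, hFcj, pvShrink_cons_concat]
          by_cases hlo : PySem.Chars.lowerChar ci = PySem.Chars.lowerChar cj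
          · rw [if_pos hlo, if_pos hlo]
            rw [ih (i + 1) (j - 1) c (by omega) (by omega) (by omega)]
            rw [show (i + 1).toNat = i.toNat + 1 by omega,
              show (j - 1 + 1 - (i + 1)).toNat = m - 2 by omega]
          · rw [if_neg hlo, if_neg hlo]
            rw [ih i (j - 1) (c + 1) (by omega) hi (by omega)]
            rw [show (j - 1 + 1 - i).toNat = m - 1 by omega, hsegl, pvF_cons, if_pos hai]
        · -- s[j] not alphanumeric: skip it
          rw [if_neg (by simpa using hai), if_pos (by simpa using haj)]
          rw [ih i (j - 1) c (by omega) hi (by omega)]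
          rw [show (j - 1 + 1 - i).toNat = m - 1 by omega, hsegl]
          rw [hseg, pvF_cons, pvF_cons, if_pos hai, if_pos hai, pvF_append]
          have hFcj : pvF [cj] = [] := by simp [pvF, haj]
          rw [hFcj, List.append_nil]
      · -- s[i] not alphanumeric: skip it
        rw [if_pos (by simpa using hai)]
        rw [ih (i + 1) j c (by omega) (by omega) hj]
        rw [hseg, pvF_cons, if_neg hai]
        rw [show (i + 1).toNat = i.toNat + 1 by omega,
          show (j + 1 - (i + 1)).toNat = m - 1 by omega, hmidlast]
    · rw [pvLoopA, dif_neg hji, pvF_short]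
      have := List.length_take_le (j + 1 - i).toNat (cs.drop i.toNat)
      omega

-- ===== VERDICT (by name: the statement is the Claim_ definition above) =====
theorem minimumCharacters_spec : Claim_equal_minimumCharacters := by
  intro s _
  unfold Spec_minimumCharacters minimumCharacters minimumCharacters_alt
  have hA : pvLoopA s.toList 0 ((s.toList.length : Int) - 1) 0
      = pvShrink (pvF s.toList) 0 := by
    rw [pvKey s.toList (s.toList.length) 0 ((s.toList.length : Int) - 1) 0
      (by omega) (by omega) (by omega)]
    rcases Nat.eq_zero_or_pos s.toList.length with h0 | h0
    · simp [List.length_eq_zero_iff.mp h0, pvF]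
    · rw [show (0 : Int).toNat = 0 from rfl, List.drop_zero,
        show ((s.toList.length : Int) - 1 + 1 - 0).toNat = s.toList.length by omega,
        List.take_length]
  rw [hA, show (s.toList.filter PySem.Chars.isalnum).map PySem.Chars.lowerChar = pvF s.toList from rfl,
    pvLoopB_eq_shrink (pvF s.toList).length _ _ le_rfl]
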